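-- pv_equiv track=rewrite | github.com/liuziyi-subtle/NonwearCheck | test.py | preprocess_t
-- ===== SOURCE A (Python) =====
-- def preprocess_t(sig):
--     th = 500
--     ref = sig[0]
--     sub = 0
--     for i in range(1, len(sig)):
--         if abs(sig[i] - ref) > th:
--             sub = sub + (sig[i] - ref)
--         ref = sig[i]
--         sig[i] = sig[i] - sub
--     return sig
-- ===== SOURCE B (Python) =====
-- def preprocess_t(sig):
--     th = 500
--     ref = sig[0]  # explicit read of the first element: empty input still raises IndexError
--     # stage 1: per-step jump contributions from consecutive original values
--     jumps = [(b - a) if abs(b - a) > th else 0 for a, b in zip(sig, sig[1:])]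
--     # stage 2: prefix-sum the jumps into cumulative corrections
--     corr = []
--     total = 0
--     for j in jumps:
--         total += j
--         corr.append(total)
--     # stage 3: subtract corrections from the tail, written back in place
--     sig[1:] = [v - c for v, c in zip(sig[1:], corr)]
--     return sig
-- ===== Notes on version B (the rewrite author's own statement) =====
-- stated objective: alternative
-- what changed: Replaces A's single fused mutate-as-you-go loop carrying (ref, sub) state with a three-stage pipeline: a zip comprehension yielding per-step jump contributions, a prefix-sum pass turning them into cumulative corrections, and a zip comprehension subtracting them from the tail; same O(n) cost.
import Mathlib
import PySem

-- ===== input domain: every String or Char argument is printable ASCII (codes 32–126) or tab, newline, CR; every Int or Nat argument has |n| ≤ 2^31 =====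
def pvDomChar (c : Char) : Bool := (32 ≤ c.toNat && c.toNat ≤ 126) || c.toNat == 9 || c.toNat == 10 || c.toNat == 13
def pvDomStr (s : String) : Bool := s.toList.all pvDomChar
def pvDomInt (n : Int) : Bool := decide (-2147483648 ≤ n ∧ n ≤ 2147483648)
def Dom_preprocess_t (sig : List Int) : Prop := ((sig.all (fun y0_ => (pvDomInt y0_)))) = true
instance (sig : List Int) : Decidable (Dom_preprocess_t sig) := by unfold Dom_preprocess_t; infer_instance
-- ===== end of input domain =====

-- B replaces A's fused stateful loop by a three-stage pipeline (jump contributions,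
-- prefix sums, subtraction); return-value equivalence on nonempty input.
-- A mutates its argument in place; B performs the same in-place mutation; the
-- equivalence proved here is about the return value.

-- ===== PORT A =====
-- A's loop: state (ref, sub); each step reads the original sig[i] (ref is saved before
-- sig[i] is overwritten), so carrying (ref, sub) along the tail is the loop step for step
def preprocess_t_loop (ref sub : Int) : List Int → List Int
  | [] => []
  | x :: rest =>
      let sub' := if |x - ref| > 500 then sub + (x - ref) else sub
      (x - sub') :: preprocess_t_loop x sub' rest

def preprocess_t (sig : List Int) : List Int :=
  match sig with
  | [] => []          -- Python raises IndexError reading the first element; excluded by Pre_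
  | x :: rest => x :: preprocess_t_loop x 0 rest

-- ===== PORT B =====
-- stage 2 of Source B: the hand-written prefix-sum loop, ported literally
def preprocess_t_prefix (total : Int) : List Int → List Int
  | [] => []
  | j :: js => (total + j) :: preprocess_t_prefix (total + j) js

def preprocess_t_alt (sig : List Int) : List Int :=
  match sig with
  | [] => []          -- Python raises IndexError reading the first element; excluded by Pre_
  | x :: rest =>
      -- stage 1: per-step jump contributions from zip(sig, sig[1:])
      let jumps := List.zipWith (fun a b => if |b - a| > 500 then b - a else 0) sig rest
      -- stage 3: subtract cumulative corrections from the tail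
      x :: List.zipWith (fun v c => v - c) rest (preprocess_t_prefix 0 jumps)

-- ===== PRECONDITION & SPEC =====
-- Pre_ excludes only the empty list, on which A raises IndexError reading the first element
def Pre_preprocess_t (sig : List Int) : Prop := sig ≠ []
instance (sig : List Int) : Decidable (Pre_preprocess_t sig) := by unfold Pre_preprocess_t; infer_instance
def pvWitness_preprocess_t : List Int := [0, 600, 700]
def Spec_preprocess_t (sig : List Int) (out : List Int) : Prop := out = preprocess_t_alt sig
instance (sig : List Int) (out : List Int) : Decidable (Spec_preprocess_t sig out) := by unfold Spec_preprocess_t; infer_instance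

-- ===== CLAIM (what is proved, stated in full; the proofs are below) =====
def Claim_equal_preprocess_t : Prop := ∀ (sig : List Int), Dom_preprocess_t sig → Pre_preprocess_t sig → Spec_preprocess_t sig (preprocess_t sig)

-- ===== LEMMAS AND PROOFS =====
theorem loop_eq_pipeline (rest : List Int) : ∀ (prev sub : Int),
    preprocess_t_loop prev sub rest
      = List.zipWith (fun v c => v - c) rest
          (preprocess_t_prefix sub
            (List.zipWith (fun a b => if |b - a| > 500 then b - a else 0) (prev :: rest) rest)) := by
  induction rest with
  | nil => intro prev sub; rfl
  | cons x rest ih =>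
      intro prev sub
      by_cases h : |x - prev| > 500 <;>
        simp [preprocess_t_loop, preprocess_t_prefix, h, ih]

-- ===== VERDICT (by name: the statement is the Claim_ definition above) =====
theorem preprocess_t_spec : Claim_equal_preprocess_t := by
  intro sig _ hpre
  unfold Spec_preprocess_t
  cases sig with
  | nil => exact absurd rfl hpre
  | cons x rest =>
      simp [preprocess_t, preprocess_t_alt, loop_eq_pipeline]
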